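-- pv_equiv track=rewrite | github.com/TomMaullin/PythonIntro2019_Solutions | 02_functions_modules_and_packages/question4a.py | next_las
-- ===== SOURCE A (Python) =====
-- def next_las(las_k):
--
--     # It is useful to have the character as a string
--     # for this function
--     las_k_str = str(las_k)
--
--     # We need a counter to see how many times an
--     # element has occurred
--     counter = 0
--
--     # We need a string for the (k+1)th las number
--     las_kplusone_str = ''
--
--     # Initialize previous look and say digit we saw
--     # to first digit
--     prev_las_k_char = las_k_str[0]
--
--     # We loop through each character counting how
--     # many times it occurs
--     for las_k_char in las_k_str:
--
--         # If the last digit we saw is the same as this one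
--         if las_k_char == prev_las_k_char:
--
--             # Increment the counter
--             counter = counter + 1
--
--         # If we have seen a new digit
--         else:
--
--             # We now need to add how many times we saw the
--             # last digit and the last digit itself to our
--             las_kplusone_str = las_kplusone_str + str(counter) + prev_las_k_char
--
--             # Update the previous look and say character to our new character
--             prev_las_k_char = las_k_char
--
--             # Reset the counter
--             counter = 1
--
--     # We still need to add the last counter and digit
--     las_kplusone_str = las_kplusone_str + str(counter) + prev_las_k_char
--
--     # Convert our string back to an integer
--     las_kplusone = int(las_kplusone_str)
--
--     return(las_kplusone)
-- ===== SOURCE B (Python) =====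
-- def next_las(las_k):
--     n = las_k
--     out = ''
--     while True:
--         d = n % 10
--         n = n // 10
--         count = 1
--         while n > 0 and n % 10 == d:
--             n = n // 10
--             count = count + 1
--         out = str(count) + str(d) + out
--         if n <= 0:
--             return int(out)
-- ===== Notes on version B (the rewrite author's own statement) =====
-- stated objective: alternative
-- what changed: Instead of converting the number to a string and scanning it left-to-right with a prev-char/counter state machine, B never builds str(las_k): it peels digit runs off the integer itself right-to-left with % 10 and // 10, and assembles the output string back-to-front by prepending each count-digit piece.
import Mathlib
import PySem

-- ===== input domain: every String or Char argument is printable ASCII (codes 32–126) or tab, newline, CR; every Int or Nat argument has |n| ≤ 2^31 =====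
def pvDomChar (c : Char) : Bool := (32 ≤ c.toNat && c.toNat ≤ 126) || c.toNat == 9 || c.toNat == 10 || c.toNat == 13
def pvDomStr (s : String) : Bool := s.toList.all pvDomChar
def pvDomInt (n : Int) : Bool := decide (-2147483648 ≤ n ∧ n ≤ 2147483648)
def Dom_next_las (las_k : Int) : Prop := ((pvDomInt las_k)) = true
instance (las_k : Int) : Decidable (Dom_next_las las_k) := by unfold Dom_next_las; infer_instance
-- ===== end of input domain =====

-- B never builds str(las_k): it peels digit runs off the integer right-to-left with % and //
-- and assembles the output string back-to-front, instead of A's left-to-right scan of the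
-- decimal string with a prev-char/counter state machine. Same cost; objective: alternative.

-- ===== PORT A =====
-- one loop step of A: carried state is (counter, output-so-far, previous char)
def pvStepA (st : Int × List Char × Char) (c : Char) : Int × List Char × Char :=
  if c == st.2.2 then (st.1 + 1, st.2.1, st.2.2)
  else (1, st.2.1 ++ PySem.Int.toChars st.1 ++ [st.2.2], c)

def next_las (las_k : Int) : Int :=
  let s := PySem.Int.toChars las_k                          -- las_k_str (list side of str(las_k))
  let prev0 := (PySem.List.pyGet? s 0).getD ' '             -- las_k_str[0]; str(int) is never empty
  let st := s.foldl pvStepA (0, [], prev0)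
  let res := st.2.1 ++ PySem.Int.toChars st.1 ++ [st.2.2]   -- final append of counter and digit
  (PySem.Int.ofChars? res).getD 0                           -- int(...); none (negatives) is outside Pre_

-- ===== PORT B =====
-- inner while of Source B: divide the trailing run of digit d out of n, counting it.
-- fuel only makes the recursion structural; n.toNat steps always suffice (n shrinks by //10).
def pvPeel : Nat → Int → Int → Int → Int × Int
  | 0, n, _, count => (n, count)
  | fuel + 1, n, d, count =>
    if 0 < n ∧ PySem.Int.mod n 10 = d then pvPeel fuel (PySem.Int.floordiv n 10) d (count + 1)
    else (n, count)

-- outer while True of Source B: out accumulates the answer string, built back-to-front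
def pvLoopB : Nat → Int → List Char → List Char
  | 0, _, out => out
  | fuel + 1, n, out =>
    let d := PySem.Int.mod n 10                               -- d = n % 10
    let n1 := PySem.Int.floordiv n 10                         -- n = n // 10
    let p := pvPeel n1.toNat n1 d 1                           -- inner while; p = (n, count)
    let out2 := PySem.Int.toChars p.2 ++ PySem.Int.toChars d ++ out  -- out = str(count)+str(d)+out
    if p.1 ≤ 0 then out2 else pvLoopB fuel p.1 out2           -- if n <= 0: return, else next iteration

def next_las_alt (las_k : Int) : Int :=
  (PySem.Int.ofChars? (pvLoopB (las_k.toNat + 1) las_k [])).getD 0  -- return int(out)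

-- ===== PRECONDITION & SPEC =====
-- Pre_ excludes negative inputs: there str(las_k) contains '-', so A's final int(...) raises ValueError.
def Pre_next_las (las_k : Int) : Prop := 0 ≤ las_k
instance (las_k : Int) : Decidable (Pre_next_las las_k) := by unfold Pre_next_las; infer_instance
def pvWitness_next_las : Int := 1211

def Spec_next_las (las_k : Int) (out : Int) : Prop := out = next_las_alt las_k
instance (las_k : Int) (out : Int) : Decidable (Spec_next_las las_k out) := by unfold Spec_next_las; infer_instance

-- ===== CLAIM (what is proved, stated in full; the proofs are below) =====
def Claim_equal_next_las : Prop := ∀ (las_k : Int), Dom_next_las las_k → Pre_next_las las_k → Spec_next_las las_k (next_las las_k)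

-- ===== LEMMAS AND PROOFS =====

-- run-length view of a character list (proof-side specification shared by both directions)
def pvRunLen (c : Char) : List Char → Nat
  | [] => 0
  | d :: rest => if d == c then pvRunLen c rest + 1 else 0

def pvRuns : List Char → List (Char × Nat)
  | [] => []
  | c :: rest => (c, 1 + pvRunLen c rest) :: pvRuns (rest.drop (pvRunLen c rest))
  termination_by cs => cs.length
  decreasing_by simp

def pvEnc (rs : List (Char × Nat)) : List Char :=
  rs.flatMap (fun p => PySem.Int.toChars (p.2 : Int) ++ [p.1])

lemma pvRuns_nil : pvRuns [] = [] := by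
  simp [pvRuns]

lemma pvRuns_cons (c : Char) (rest : List Char) :
    pvRuns (c :: rest) = (c, 1 + pvRunLen c rest) :: pvRuns (rest.drop (pvRunLen c rest)) := by
  simp [pvRuns]

-- A's fold, completed by the final append, emits exactly the run encoding.
lemma pvLoopA_eq (cs : List Char) : ∀ (prev : Char) (m : Int) (out : List Char),
    (let st := cs.foldl pvStepA (m, out, prev)
     st.2.1 ++ PySem.Int.toChars st.1 ++ [st.2.2]) =
    out ++ PySem.Int.toChars (m + (pvRunLen prev cs : Int)) ++ [prev]
        ++ pvEnc (pvRuns (cs.drop (pvRunLen prev cs))) := by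
  induction cs with
  | nil => intro prev m out; simp [pvRunLen, pvRuns_nil, pvEnc]
  | cons c rest ih =>
    intro prev m out
    by_cases h : c = prev
    · subst h
      simp only [List.foldl_cons, pvStepA, beq_self_eq_true, if_true]
      have := ih c (m + 1) out
      simp only at this
      rw [this]
      simp only [pvRunLen, beq_self_eq_true, if_true]
      have harg : m + 1 + (pvRunLen c rest : Int) = m + ((pvRunLen c rest + 1 : Nat) : Int) := by
        push_cast; ring
      rw [harg]
      simp [List.drop_succ_cons]
    · have hb : (c == prev) = false := by simp [h]
      simp only [List.foldl_cons, pvStepA, hb, Bool.false_eq_true, if_false]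
      have := ih c 1 (out ++ PySem.Int.toChars m ++ [prev])
      simp only at this
      rw [this]
      simp only [pvRunLen, hb, Bool.false_eq_true, if_false, Nat.cast_zero, add_zero,
        List.drop_zero]
      rw [pvRuns_cons]
      have hc : ((1 + pvRunLen c rest : Nat) : Int) = 1 + (pvRunLen c rest : Int) := by
        push_cast; ring
      simp [pvEnc, hc, List.append_assoc]

lemma pvToDigitsCore_len (b : Nat) :
    ∀ (f n : Nat) (l : List Char), l.length ≤ (Nat.toDigitsCore b f n l).length := by
  intro f
  induction f with
  | zero => intro n l; simp [Nat.toDigitsCore]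
  | succ f ih =>
    intro n l
    simp only [Nat.toDigitsCore]
    split
    · simp
    · exact le_trans (by simp) (ih (n / b) (Nat.digitChar (n % b) :: l))

lemma pvToDigits_ne_nil (b n : Nat) : Nat.toDigits b n ≠ [] := by
  apply List.ne_nil_of_length_pos
  show 0 < (Nat.toDigitsCore b (n + 1) n []).length
  simp only [Nat.toDigitsCore]
  split
  · simp
  · exact lt_of_lt_of_le (by simp) (pvToDigitsCore_len b n (n / b) [Nat.digitChar (n % b)])

lemma pvToChars_ne_nil (n : Int) : PySem.Int.toChars n ≠ [] := by
  unfold PySem.Int.toChars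
  split
  · simp
  · exact pvToDigits_ne_nil 10 n.toNat

lemma pvToChars_natCast (k : Nat) : PySem.Int.toChars (k : Int) = Nat.toDigits 10 k := by
  unfold PySem.Int.toChars
  simp

-- A's whole computation, characterised through the run encoding of str(las_k)
lemma pvA_char (las_k : Int) :
    next_las las_k = (PySem.Int.ofChars? (pvEnc (pvRuns (PySem.Int.toChars las_k)))).getD 0 := by
  unfold next_las
  obtain ⟨c, rest, hs⟩ : ∃ c rest, PySem.Int.toChars las_k = c :: rest := by
    cases h : PySem.Int.toChars las_k with
    | nil => exact absurd h (pvToChars_ne_nil las_k)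
    | cons c rest => exact ⟨c, rest, rfl⟩
  simp only [hs]
  have hget : (PySem.List.pyGet? (c :: rest) 0).getD ' ' = c := by
    simp [PySem.List.pyGet?, PySem.List.pyIdx?]
  rw [hget]
  have hstep : List.foldl pvStepA (0, [], c) (c :: rest) = List.foldl pvStepA (1, [], c) rest := by
    simp [pvStepA]
  rw [hstep]
  have := pvLoopA_eq rest c 1 []
  simp only at this
  rw [this, pvRuns_cons]
  have harg : (1 : Int) + (pvRunLen c rest : Int) = ((1 + pvRunLen c rest : Nat) : Int) := by
    push_cast; ring
  rw [harg]
  simp [pvEnc]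

-- ---- B side ----

lemma pvRunLen_le (c : Char) (xs : List Char) : pvRunLen c xs ≤ xs.length := by
  induction xs with
  | nil => simp [pvRunLen]
  | cons x xs ih =>
    simp only [pvRunLen]
    split
    · simp; omega
    · simp

lemma pvRunLen_replicate (c : Char) (r : Nat) : pvRunLen c (List.replicate r c) = r := by
  induction r with
  | zero => simp [pvRunLen]
  | succ r ih => simp [List.replicate_succ, pvRunLen, ih]

lemma pvRunLen_eq_length (c : Char) (xs : List Char) (h : pvRunLen c xs = xs.length) :
    xs = List.replicate xs.length c := by
  induction xs with
  | nil => simp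
  | cons x xs ih =>
    simp only [pvRunLen] at h
    by_cases hx : x == c
    · simp only [hx, if_true, List.length_cons] at h
      have hx' : x = c := by simpa using hx
      subst hx'
      rw [List.length_cons, List.replicate_succ]
      rw [ih (by omega)]
      simp
    · have hle := pvRunLen_le c xs
      simp only [hx, Bool.false_eq_true, if_false, List.length_cons] at h
      omega

lemma pvRunLen_append (c : Char) (xs ys : List Char) :
    pvRunLen c (xs ++ ys) =
      if pvRunLen c xs < xs.length then pvRunLen c xs else xs.length + pvRunLen c ys := by
  induction xs with
  | nil => simp [pvRunLen]
  | cons x xs ih =>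
    simp only [List.cons_append, pvRunLen]
    by_cases hx : x == c
    · have hle := pvRunLen_le c xs
      simp only [hx, if_true, ih, List.length_cons]
      split <;> split <;> omega
    · have hl : (0:Nat) < (x :: xs).length := by simp
      simp only [hx, Bool.false_eq_true, if_false]
      rw [if_pos hl]

lemma pvRuns_replicate (c : Char) (r : Nat) (hr : 1 ≤ r) :
    pvRuns (List.replicate r c) = [(c, r)] := by
  obtain ⟨r', rfl⟩ : ∃ r', r = r' + 1 := ⟨r - 1, by omega⟩
  rw [List.replicate_succ, pvRuns_cons, pvRunLen_replicate]
  simp [pvRuns_nil]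
  omega

lemma pvRunLen_of_head_ne (c : Char) (xs : List Char) (hx : xs ≠ []) (hh : xs.head hx ≠ c) :
    pvRunLen c xs = 0 := by
  cases xs with
  | nil => simp at hx
  | cons x xs => simp at hh; simp [pvRunLen, hh]

lemma pvRuns_append_replicate (xs : List Char) (c : Char) (r : Nat)
    (hxs : xs ≠ []) (hlast : xs.getLast hxs ≠ c) (hr : 1 ≤ r) :
    pvRuns (xs ++ List.replicate r c) = pvRuns xs ++ [(c, r)] := by
  induction hn : xs.length using Nat.strong_induction_on generalizing xs with
  | _ n ih =>
  cases xs with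
  | nil => simp at hxs
  | cons x xs' =>
    have hlen := pvRunLen_le x xs'
    rw [List.cons_append, pvRuns_cons, pvRuns_cons, pvRunLen_append]
    rcases Nat.lt_or_ge (pvRunLen x xs') xs'.length with hlt | hge
    · rw [if_pos hlt, List.drop_append_of_le_length (by omega)]
      have hxs' : xs' ≠ [] := by intro hc; subst hc; simp at hlt
      have hne : xs'.drop (pvRunLen x xs') ≠ [] := by
        intro hc; have := congrArg List.length hc; simp at this; omega
      have hlast' : (xs'.drop (pvRunLen x xs')).getLast hne ≠ c := by
        intro hc
        apply hlast
        rw [List.getLast_cons hxs', ← List.getLast_drop (l := xs') (i := pvRunLen x xs') hne, hc]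
      have := ih (xs'.drop (pvRunLen x xs')).length
        (by rw [List.length_drop]; simp only [List.length_cons] at hn; omega) _ hne hlast' rfl
      rw [this]
      simp
    · have heq : pvRunLen x xs' = xs'.length := by omega
      have hrepl := pvRunLen_eq_length x xs' heq
      have hxlast : x = (x :: xs').getLast hxs := by
        rcases Nat.eq_zero_or_pos xs'.length with h0 | hpos
        · have hnil : xs' = [] := List.eq_nil_of_length_eq_zero h0
          subst hnil; simp
        · have hxs' : xs' ≠ [] := by intro hc; subst hc; simp at hpos
          rw [List.getLast_cons hxs',
            List.getLast_congr _ (by rw [← hrepl]; exact hxs') hrepl]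
          have hgen : ∀ (L : Nat), 0 < L → ∀ (h : List.replicate L x ≠ []),
              (List.replicate L x).getLast h = x := by
            intro L hL h
            obtain ⟨m, rfl⟩ : ∃ m, L = m + 1 := ⟨L - 1, by omega⟩
            exact List.getLast_replicate _
          exact (hgen _ hpos _).symm
      have hcx : c ≠ x := fun hc => hlast (by rw [← hxlast, hc])
      have hR0 : pvRunLen x (List.replicate r c) = 0 := by
        obtain ⟨m, rfl⟩ : ∃ m, r = m + 1 := ⟨r - 1, by omega⟩
        exact pvRunLen_of_head_ne _ _ (by simp) (by rw [List.head_replicate]; exact hcx)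
      rw [if_neg (by omega), hR0, heq]
      have hd1 : (xs' ++ List.replicate r c).drop (xs'.length + 0) = List.replicate r c := by simp
      have hd2 : xs'.drop xs'.length = [] := by simp
      rw [hd1, hd2, pvRuns_replicate c r hr, pvRuns_nil]
      simp


lemma pvDigitChar_inj (a b : Nat) (ha : a < 10) (hb : b < 10)
    (h : Nat.digitChar a = Nat.digitChar b) : a = b := by
  interval_cases a <;> interval_cases b <;> simp_all [Nat.digitChar]

-- digits of k with "no digits at all" for k = 0 (rather than "0")
def pvPre (k : Nat) : List Char := if k = 0 then [] else Nat.toDigits 10 k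

lemma pvPre_peel (k : Nat) (hk : 0 < k) :
    pvPre k = pvPre (k / 10) ++ [Nat.digitChar (k % 10)] := by
  unfold pvPre
  rcases Nat.lt_or_ge k 10 with h | h
  · rw [if_neg (by omega), if_pos (by omega), Nat.toDigits_of_lt_base h]
    simp [Nat.mod_eq_of_lt h]
  · rw [if_neg (by omega), if_neg (by omega), Nat.toDigits_of_base_le (by norm_num) h]

lemma pvPre_getLast (k : Nat) (hk : 0 < k) (h : pvPre k ≠ []) :
    (pvPre k).getLast h = Nat.digitChar (k % 10) := by
  rw [List.getLast_congr _ (by simp) (pvPre_peel k hk)]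
  simp

-- the inner while peels exactly the trailing run of digit d (any fuel ≥ k suffices)
lemma pvPeel_spec (fuel k d : Nat) (hfuel : k ≤ fuel) (_hd : d < 10) (c : Int) :
    ∃ k2 j : Nat, pvPeel fuel (k : Int) (d : Int) c = ((k2 : Int), c + (j : Int)) ∧
      k2 ≤ k ∧
      pvPre k = pvPre k2 ++ List.replicate j (Nat.digitChar d) ∧
      (k2 = 0 ∨ k2 % 10 ≠ d) := by
  induction fuel generalizing k c with
  | zero =>
    exact ⟨k, 0, by simp [pvPeel], le_refl _, by simp, Or.inl (by omega)⟩
  | succ fuel ih =>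
    have h10 : ((10 : Nat) : Int) = 10 := by norm_num
    by_cases hcond : 0 < (k : Int) ∧ PySem.Int.mod (k : Int) 10 = (d : Int)
    · have hk : 0 < k := by exact_mod_cast hcond.1
      have hmod : k % 10 = d := by
        have hm := hcond.2
        rw [← h10, PySem.Int.mod_natCast] at hm
        exact_mod_cast hm
      have hfd : PySem.Int.floordiv (k : Int) 10 = ((k / 10 : Nat) : Int) := by
        rw [← h10, PySem.Int.floordiv_natCast]
      obtain ⟨k2, j, h1, h2, h3, h4⟩ := ih (k / 10) (by omega) (c + 1)
      refine ⟨k2, j + 1, ?_, by omega, ?_, h4⟩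
      · rw [pvPeel, if_pos hcond, hfd, h1]
        congr 1
        push_cast
        ring
      · rw [pvPre_peel k hk, h3, hmod, List.replicate_succ']
        simp [List.append_assoc]
    · refine ⟨k, 0, ?_, le_refl _, by simp, ?_⟩
      · rw [pvPeel, if_neg hcond]
        simp
      · rcases Nat.eq_zero_or_pos k with rfl | hk
        · exact Or.inl rfl
        · refine Or.inr fun hc => hcond ⟨by exact_mod_cast hk, ?_⟩
          rw [← h10, PySem.Int.mod_natCast, hc]

-- the outer loop produces the run encoding of the decimal digits, prepended to out
lemma pvLoopB_eq (fuel k : Nat) (hk : 0 < k) (hfuel : k ≤ fuel) : ∀ (out : List Char),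
    pvLoopB fuel (k : Int) out = pvEnc (pvRuns (Nat.toDigits 10 k)) ++ out := by
  induction fuel generalizing k with
  | zero => omega
  | succ fuel ih =>
  intro out
  have h10 : ((10 : Nat) : Int) = 10 := by norm_num
  have hmod : PySem.Int.mod (k : Int) 10 = ((k % 10 : Nat) : Int) := by
    rw [← h10, PySem.Int.mod_natCast]
  have hfd : PySem.Int.floordiv (k : Int) 10 = ((k / 10 : Nat) : Int) := by
    rw [← h10, PySem.Int.floordiv_natCast]
  obtain ⟨k2, j, hpeel, hle, hpre, hcase⟩ :=
    pvPeel_spec (k / 10) (k / 10) (k % 10) (le_refl _) (Nat.mod_lt _ (by norm_num)) 1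
  have hdig : PySem.Int.toChars ((k % 10 : Nat) : Int) = [Nat.digitChar (k % 10)] := by
    rw [pvToChars_natCast, Nat.toDigits_of_lt_base (Nat.mod_lt _ (by norm_num))]
  have hdigits : Nat.toDigits 10 k = pvPre k2 ++ List.replicate (j + 1) (Nat.digitChar (k % 10)) := by
    have h1 : Nat.toDigits 10 k = pvPre k := by unfold pvPre; rw [if_neg (by omega)]
    rw [h1, pvPre_peel k hk, hpre, List.replicate_succ']
    simp [List.append_assoc]
  have hcast : (1 : Int) + (j : Int) = ((j + 1 : Nat) : Int) := by push_cast; ring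
  rw [pvLoopB]
  simp only [hmod, hfd, Int.toNat_natCast, hpeel, hdig, hcast]
  rcases Nat.eq_zero_or_pos k2 with rfl | hk2
  · rw [if_pos (by norm_num)]
    rw [hdigits]
    have hp0 : pvPre 0 = [] := rfl
    rw [hp0, List.nil_append, pvRuns_replicate _ _ (by omega)]
    simp [pvEnc]
  · rw [if_neg (by omega)]
    have hpre2 : pvPre k2 = Nat.toDigits 10 k2 := by unfold pvPre; rw [if_neg (by omega)]
    have hne : Nat.toDigits 10 k2 ≠ [] := pvToDigits_ne_nil 10 k2
    have hlast : (Nat.toDigits 10 k2).getLast hne ≠ Nat.digitChar (k % 10) := by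
      intro hc
      have h1 : (pvPre k2).getLast (by rw [hpre2]; exact hne) = Nat.digitChar (k2 % 10) :=
        pvPre_getLast k2 hk2 _
      have h2 : (pvPre k2).getLast (by rw [hpre2]; exact hne) = Nat.digitChar (k % 10) := by
        rw [List.getLast_congr _ hne hpre2, hc]
      have h3 : k2 % 10 = k % 10 :=
        pvDigitChar_inj _ _ (Nat.mod_lt _ (by norm_num)) (Nat.mod_lt _ (by norm_num))
          (by rw [← h1, h2])
      rcases hcase with hc0 | hcne
      · omega
      · exact hcne h3
    have hruns : pvRuns (Nat.toDigits 10 k) = pvRuns (Nat.toDigits 10 k2) ++ [(Nat.digitChar (k % 10), j + 1)] := by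
      rw [hdigits, hpre2]
      exact pvRuns_append_replicate _ _ _ hne hlast (by omega)
    have hrec := ih k2 hk2 (by omega)
      (PySem.Int.toChars ((j + 1 : Nat) : Int) ++ [Nat.digitChar (k % 10)] ++ out)
    rw [hrec, hruns]
    simp [pvEnc, List.append_assoc]

-- ===== VERDICT (by name: the statement is the Claim_ definition above) =====
theorem next_las_spec : Claim_equal_next_las := by
  intro las_k _ hpre
  unfold Pre_next_las at hpre
  unfold Spec_next_las
  rw [pvA_char]
  unfold next_las_alt
  obtain ⟨k, rfl⟩ : ∃ k : Nat, las_k = (k : Int) := ⟨las_k.toNat, by omega⟩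
  rcases Nat.eq_zero_or_pos k with rfl | hk
  · have h2 : pvLoopB (((0:Nat):Int).toNat + 1) ((0:Nat):Int) [] = ['1', '0'] := by decide
    have h3 : PySem.Int.toChars ((0:Nat):Int) = ['0'] := by decide
    rw [h2, h3, pvRuns_cons]
    simp only [pvRunLen, pvRuns_nil, pvEnc, List.drop_nil]
    decide
  · have htn : (((k:Nat):Int)).toNat = k := by simp
    rw [htn, pvLoopB_eq (k + 1) k hk (by omega) [], pvToChars_natCast]
    simp
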